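-- pv_equiv track=rewrite | github.com/nclement/cvc-scripts | alignment/utils.py | SimplifySelection
-- ===== SOURCE A (Python) =====
-- def SimplifySelection(prot, cont):
--   # Multiple chains requires two parentheses.
--   multi_chain = False
--   if len(set([x[0] for x in cont])) > 1:
--     multi_chain = True
--
--   str = '%s & n. ca & ' % prot
--   if multi_chain:
--     str += '('
--   chain = None
--   prev_resi = -2
--   printed_resi = False
--   for x in cont:
--     this_chain = x[0]
--     this_resi = int(x[2])
--     # Initial chain not set.
--     if not chain:
--       str += '(chain %s & resi ' % this_chain
--     # Found a new chain to process.
--     elif chain != this_chain: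
--       if not printed_resi:
--         str += '-%s' % prev_resi
--       str += ') + (chain %s & resi ' % this_chain
--       prev_resi = -2
--       printed_resi = False
--
--     # Found something non-sequential.
--     if this_resi > prev_resi + 1:
--       # Actually, haven't seen anything before (in this chain).
--       if prev_resi == -2:
--         str += '%s' % this_resi
--       elif not printed_resi:
--         # Haven't printed the terminal residue in this sequence.
--         str += '-%s+%s' % (prev_resi, this_resi)
--       else:
--         str += '+%s' % this_resi
--       printed_resi = True
--     else:
--       printed_resi = False
--
--     chain = this_chain
--     prev_resi = this_resi
--
--   if not printed_resi:
--     str += '-%s' % prev_resi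
--
--   if multi_chain:
--     str += ')'
--   return str + ')'
-- ===== SOURCE B (Python) =====
-- def SimplifySelection(prot, cont):
--   n = len(cont)
--   chain = [x[0] for x in cont]
--   resi = [int(x[2]) for x in cont]
--
--   def last_resi(i):
--     # residue seen just before position i; -2 before the first
--     return resi[i - 1] if i > 0 else -2
--
--   def prevval(i):
--     # predecessor residue within position i's own chain group
--     return resi[i - 1] if i > 0 and chain[i - 1] == chain[i] else -2
--
--   def opened(i):
--     # position i started a new residue run
--     return resi[i] > prevval(i) + 1
--
--   def tail(i):
--     # closes the run that is still open just before position i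
--     return '' if i > 0 and opened(i - 1) else '-%d' % last_resi(i)
--
--   def piece(i):
--     v, pv = resi[i], prevval(i)
--     if v <= pv + 1:
--       return ''
--     if pv == -2:
--       return '%d' % v
--     if opened(i - 1):
--       return '+%d' % v
--     return '-%d+%d' % (pv, v)
--
--   def opener(i):
--     if i == 0:
--       return '(chain %s & resi ' % chain[i]
--     if chain[i - 1] != chain[i]:
--       return tail(i) + ') + (chain %s & resi ' % chain[i]
--     return ''
--
--   sel = ''.join(opener(i) + piece(i) for i in range(n)) + tail(n)
--   if len(set(chain)) > 1:
--     sel = '(' + sel + ')'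
--   return '%s & n. ca & %s)' % (prot, sel)
-- ===== Notes on version B (the rewrite author's own statement) =====
-- stated objective: alternative
-- what changed: B replaces A's stateful accumulating fold (mutable chain/prev_resi/printed_resi state threaded through one loop) by a stateless windowed formulation: pure per-index functions (opener/piece/tail over the chain and residue lists, each looking only at a fixed window of predecessors) are rendered by a single join comprehension, with a uniform trailing run-closer.
-- intended difference: On lists where an empty-string chain id occurs before the last element, A's falsy 'not chain' test reopens a '(chain ... & resi' group without closing the previous one (and carries the previous residue state across the boundary); B treats '' like any other chain id and renders ') + (' between the groups, which is the intended selection syntax. — e.g. on SimplifySelection("p", [("", "y", "1"), ("", "z", "2")]): A returns "p & n. ca & (chain & resi 1(chain & resi -2)", B returns "p & n. ca & (chain & resi 1-2)"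
import Mathlib
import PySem

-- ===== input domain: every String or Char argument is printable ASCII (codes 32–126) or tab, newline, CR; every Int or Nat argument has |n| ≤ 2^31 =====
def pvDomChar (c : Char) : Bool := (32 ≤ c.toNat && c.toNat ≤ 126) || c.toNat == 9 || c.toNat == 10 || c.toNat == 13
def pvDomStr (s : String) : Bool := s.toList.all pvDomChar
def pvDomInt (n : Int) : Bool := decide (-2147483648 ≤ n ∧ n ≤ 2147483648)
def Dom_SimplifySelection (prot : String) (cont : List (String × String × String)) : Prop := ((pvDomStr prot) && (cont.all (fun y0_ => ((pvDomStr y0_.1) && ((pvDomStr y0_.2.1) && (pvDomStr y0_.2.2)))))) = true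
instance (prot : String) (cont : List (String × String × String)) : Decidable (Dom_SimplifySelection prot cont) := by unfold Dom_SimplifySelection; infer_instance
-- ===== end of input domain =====

-- B renders the selection by stateless per-index window functions (opener/piece/tail over the
-- chain and residue lists) joined in one comprehension, instead of A's stateful accumulating
-- fold; return-value equivalence only.

-- ===== PORT A =====
-- one iteration of A's `for x in cont` loop; state = (str, chain, prev_resi, printed_resi)
def pvAStep (acc : String × Option String × Int × Bool) (x : String × String × String) :
    String × Option String × Int × Bool :=
  let s := acc.1
  let chain := acc.2.1
  let prev := acc.2.2.1
  let printed := acc.2.2.2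
  let thisChain := x.1
  let thisResi := (PySem.Int.ofStr? x.2.2).getD 0  -- int(x[2]); Pre_ excludes the ValueError case
  let sw : String × Int × Bool :=
    if chain = none ∨ chain = some "" then          -- `if not chain`
      (s ++ "(chain " ++ thisChain ++ " & resi ", prev, printed)
    else if chain ≠ some thisChain then             -- `elif chain != this_chain`
      ((if printed = false then s ++ "-" ++ PySem.Int.toStr prev else s) ++
        ") + (chain " ++ thisChain ++ " & resi ", -2, false)
    else (s, prev, printed)
  if thisResi > sw.2.1 + 1 then
    (if sw.2.1 = -2 then sw.1 ++ PySem.Int.toStr thisResi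
     else if sw.2.2 = false then sw.1 ++ "-" ++ PySem.Int.toStr sw.2.1 ++ "+" ++ PySem.Int.toStr thisResi
     else sw.1 ++ "+" ++ PySem.Int.toStr thisResi, some thisChain, thisResi, true)
  else (sw.1, some thisChain, thisResi, false)

def SimplifySelection (prot : String) (cont : List (String × String × String)) : String :=
  let multi := 1 < PySem.Set.len (PySem.Set.ofList (cont.map (fun x => x.1)))
  let s0 := prot ++ " & n. ca & " ++ (if multi then "(" else "")
  let st := cont.foldl pvAStep (s0, none, -2, false)
  st.1 ++ (if st.2.2.2 = false then "-" ++ PySem.Int.toStr st.2.2.1 else "") ++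
    (if multi then ")" else "") ++ ")"

-- ===== PORT B =====
def pvChainsW (cont : List (String × String × String)) : List String :=
  cont.map (fun x => x.1)
def pvResisW (cont : List (String × String × String)) : List Int :=
  cont.map (fun x => (PySem.Int.ofStr? x.2.2).getD 0)

-- residue seen just before position i; -2 before the first
def pvLastResiW (rs : List Int) (i : Nat) : Int :=
  if 0 < i then rs.getD (i - 1) 0 else -2

-- predecessor residue within position i's own chain group
def pvPrevValW (ch : List String) (rs : List Int) (i : Nat) : Int :=
  if 0 < i ∧ ch.getD (i - 1) "" = ch.getD i "" then rs.getD (i - 1) 0 else -2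

-- position i started a new residue run
def pvOpenedW (ch : List String) (rs : List Int) (i : Nat) : Bool :=
  if rs.getD i 0 > pvPrevValW ch rs i + 1 then true else false

-- closes the run that is still open just before position i
def pvTailW (ch : List String) (rs : List Int) (i : Nat) : String :=
  if 0 < i ∧ pvOpenedW ch rs (i - 1) = true then ""
  else "-" ++ PySem.Int.toStr (pvLastResiW rs i)

def pvPieceW (ch : List String) (rs : List Int) (i : Nat) : String :=
  let v := rs.getD i 0
  let pv := pvPrevValW ch rs i
  if v ≤ pv + 1 then ""
  else if pv = -2 then PySem.Int.toStr v
  else if pvOpenedW ch rs (i - 1) = true then "+" ++ PySem.Int.toStr v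
  else "-" ++ PySem.Int.toStr pv ++ "+" ++ PySem.Int.toStr v

def pvOpenerW (ch : List String) (rs : List Int) (i : Nat) : String :=
  if i = 0 then "(chain " ++ ch.getD i "" ++ " & resi "
  else if ch.getD (i - 1) "" ≠ ch.getD i "" then
    pvTailW ch rs i ++ ") + (chain " ++ ch.getD i "" ++ " & resi "
  else ""

def SimplifySelection_alt (prot : String) (cont : List (String × String × String)) : String :=
  let n := cont.length
  let ch := pvChainsW cont
  let rs := pvResisW cont
  let sel := PySem.Str.join ""
      ((List.range n).map (fun i => pvOpenerW ch rs i ++ pvPieceW ch rs i)) ++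
    pvTailW ch rs n
  let sel := if 1 < PySem.Set.len (PySem.Set.ofList ch) then "(" ++ sel ++ ")" else sel
  prot ++ " & n. ca & " ++ sel ++ ")"

-- ===== PRECONDITION & SPEC =====
-- Pre_ excludes exactly the inputs where Python's int(x[2]) raises ValueError.
def Pre_SimplifySelection (prot : String) (cont : List (String × String × String)) : Prop :=
  ∀ x ∈ cont, (PySem.Int.ofStr? x.2.2).isSome = true
instance (prot : String) (cont : List (String × String × String)) :
    Decidable (Pre_SimplifySelection prot cont) := by unfold Pre_SimplifySelection; infer_instance
def pvWitness_SimplifySelection : String × (List (String × String × String)) :=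
  ("p", [("A", "x", "5")])

-- On lists where an empty-string chain id occurs before the last element, A's falsy `not chain`
-- test reopens a '(chain ... & resi' group without closing the previous one; B treats '' like
-- any other chain id and renders ') + (' between the groups, which is the intended selection
-- syntax.
def D_SimplifySelection (prot : String) (cont : List (String × String × String)) : Prop :=
  cont.dropLast.any (fun x => x.1 == "") = true
instance (prot : String) (cont : List (String × String × String)) :
    Decidable (D_SimplifySelection prot cont) := by unfold D_SimplifySelection; infer_instance

def Spec_SimplifySelection (prot : String) (cont : List (String × String × String)) (out : String) : Prop :=
  ¬ D_SimplifySelection prot cont → out = SimplifySelection_alt prot cont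
instance (prot : String) (cont : List (String × String × String)) (out : String) :
    Decidable (Spec_SimplifySelection prot cont out) := by unfold Spec_SimplifySelection; infer_instance

def pvDiffWitness_SimplifySelection : String × (List (String × String × String)) :=
  ("p", [("", "y", "1"), ("", "z", "2")])
def pvDiffWitnessOut_SimplifySelection : String × String :=
  ("p & n. ca & (chain  & resi 1(chain  & resi -2)", "p & n. ca & (chain  & resi 1-2)")

-- ===== CLAIM (what is proved, stated in full; the proofs are below) =====
def Claim_unchanged_SimplifySelection : Prop :=
  ∀ (prot : String) (cont : List (String × String × String)),
    Dom_SimplifySelection prot cont → Pre_SimplifySelection prot cont →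
      Spec_SimplifySelection prot cont (SimplifySelection prot cont)
def Claim_changed_SimplifySelection : Prop :=
  Dom_SimplifySelection (pvDiffWitness_SimplifySelection.1) (pvDiffWitness_SimplifySelection.2) ∧
  Pre_SimplifySelection (pvDiffWitness_SimplifySelection.1) (pvDiffWitness_SimplifySelection.2) ∧
  D_SimplifySelection (pvDiffWitness_SimplifySelection.1) (pvDiffWitness_SimplifySelection.2) ∧
  SimplifySelection (pvDiffWitness_SimplifySelection.1) (pvDiffWitness_SimplifySelection.2) = pvDiffWitnessOut_SimplifySelection.1 ∧
  SimplifySelection_alt (pvDiffWitness_SimplifySelection.1) (pvDiffWitness_SimplifySelection.2) = pvDiffWitnessOut_SimplifySelection.2 ∧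
  pvDiffWitnessOut_SimplifySelection.1 ≠ pvDiffWitnessOut_SimplifySelection.2
def Claim_exact_SimplifySelection : Prop :=
  ∀ (prot : String) (cont : List (String × String × String)),
    Dom_SimplifySelection prot cont → Pre_SimplifySelection prot cont →
      D_SimplifySelection prot cont →
        SimplifySelection prot cont ≠ SimplifySelection_alt prot cont

-- ===== LEMMAS AND PROOFS =====

lemma pvJoin_empty_nil : PySem.Str.join "" ([] : List String) = "" := by decide

lemma pvJoin_empty_cons (p : String) (ps : List String) :
    PySem.Str.join "" (p :: ps) = p ++ PySem.Str.join "" ps := by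
  rw [← String.toList_inj]
  cases ps <;>
    simp [PySem.Chars.join_singleton, PySem.Chars.join_cons_cons, PySem.Chars.join_nil]

lemma pvJoin_empty_append (a b : List String) :
    PySem.Str.join "" (a ++ b) = PySem.Str.join "" a ++ PySem.Str.join "" b := by
  induction a with
  | nil => simp [pvJoin_empty_nil]
  | cons p a ih =>
      rw [List.cons_append, pvJoin_empty_cons, pvJoin_empty_cons, ih, String.append_assoc]

lemma pvJoin_range_succ (f : Nat → String) (n : Nat) :
    PySem.Str.join "" ((List.range (n + 1)).map f) =
      PySem.Str.join "" ((List.range n).map f) ++ f n := by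
  rw [List.range_succ, List.map_append, pvJoin_empty_append]
  simp [pvJoin_empty_cons, pvJoin_empty_nil]

lemma pvGetD_stable {α : Type} (d : α) (a : List α) (b : α) (i : Nat) (hi : i < a.length) :
    (a ++ [b]).getD i d = a.getD i d := by
  unfold List.getD
  rw [List.getElem?_append_left hi]

lemma pvGetD_last {α : Type} (d : α) (a : List α) (b : α) :
    (a ++ [b]).getD a.length d = b := by
  unfold List.getD
  rw [List.getElem?_append_right (le_refl _)]
  simp

lemma pvPrevValW_stable (ch : List String) (rs : List Int) (c : String) (r : Int)
    (i : Nat) (hc : i < ch.length) (hr : i < rs.length) :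
    pvPrevValW (ch ++ [c]) (rs ++ [r]) i = pvPrevValW ch rs i := by
  unfold pvPrevValW
  by_cases h0 : 0 < i
  · rw [pvGetD_stable "" ch c i hc, pvGetD_stable "" ch c (i - 1) (by omega),
      pvGetD_stable 0 rs r (i - 1) (by omega)]
  · simp [h0]

lemma pvOpenedW_stable (ch : List String) (rs : List Int) (c : String) (r : Int)
    (i : Nat) (hc : i < ch.length) (hr : i < rs.length) :
    pvOpenedW (ch ++ [c]) (rs ++ [r]) i = pvOpenedW ch rs i := by
  unfold pvOpenedW
  rw [pvPrevValW_stable ch rs c r i hc hr, pvGetD_stable 0 rs r i hr]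

lemma pvTailW_stable (ch : List String) (rs : List Int) (c : String) (r : Int)
    (i : Nat) (h0 : 0 < i) (hc' : i - 1 < ch.length) (hr' : i - 1 < rs.length) :
    pvTailW (ch ++ [c]) (rs ++ [r]) i = pvTailW ch rs i := by
  unfold pvTailW pvLastResiW
  rw [pvOpenedW_stable ch rs c r (i - 1) hc' hr',
    if_pos h0, if_pos h0, pvGetD_stable 0 rs r (i - 1) hr']

lemma pvPieceW_stable (ch : List String) (rs : List Int) (c : String) (r : Int)
    (i : Nat) (hc : i < ch.length) (hr : i < rs.length) :
    pvPieceW (ch ++ [c]) (rs ++ [r]) i = pvPieceW ch rs i := by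
  unfold pvPieceW
  by_cases h0 : 0 < i
  · rw [pvPrevValW_stable ch rs c r i hc hr, pvGetD_stable 0 rs r i hr,
      pvOpenedW_stable ch rs c r (i - 1) (by omega) (by omega)]
  · have hi : i = 0 := by omega
    subst hi
    rw [pvPrevValW_stable ch rs c r 0 hc hr, pvGetD_stable 0 rs r 0 hr,
      pvOpenedW_stable ch rs c r 0 hc hr]

lemma pvOpenerW_stable (ch : List String) (rs : List Int) (c : String) (r : Int)
    (i : Nat) (hc : i < ch.length) (hr : i < rs.length) :
    pvOpenerW (ch ++ [c]) (rs ++ [r]) i = pvOpenerW ch rs i := by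
  unfold pvOpenerW
  by_cases h0 : i = 0
  · subst h0
    rw [pvGetD_stable "" ch c 0 hc]
    simp
  · rw [if_neg h0, if_neg h0, pvGetD_stable "" ch c i hc,
      pvGetD_stable "" ch c (i - 1) (by omega)]
    by_cases hd : ch.getD (i - 1) "" ≠ ch.getD i ""
    · rw [if_pos hd, if_pos hd,
        pvTailW_stable ch rs c r i (by omega) (by omega) (by omega)]
    · rw [if_neg hd, if_neg hd]

def pvResi (x : String × String × String) : Int := (PySem.Int.ofStr? x.2.2).getD 0

def pvEmit (cont : List (String × String × String)) (i : Nat) : String :=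
  pvOpenerW (pvChainsW cont) (pvResisW cont) i ++ pvPieceW (pvChainsW cont) (pvResisW cont) i

lemma pvChainsW_append (l : List (String × String × String)) (x : String × String × String) :
    pvChainsW (l ++ [x]) = pvChainsW l ++ [x.1] := by simp [pvChainsW]

lemma pvResisW_append (l : List (String × String × String)) (x : String × String × String) :
    pvResisW (l ++ [x]) = pvResisW l ++ [pvResi x] := by simp [pvResisW, pvResi]

lemma pvChainsW_length (l : List (String × String × String)) :
    (pvChainsW l).length = l.length := by simp [pvChainsW]

lemma pvResisW_length (l : List (String × String × String)) :
    (pvResisW l).length = l.length := by simp [pvResisW]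

lemma pvEmit_stable (l : List (String × String × String)) (x : String × String × String)
    (i : Nat) (hi : i < l.length) : pvEmit (l ++ [x]) i = pvEmit l i := by
  unfold pvEmit
  rw [pvChainsW_append, pvResisW_append,
    pvOpenerW_stable _ _ _ _ i (by rw [pvChainsW_length]; omega) (by rw [pvResisW_length]; omega),
    pvPieceW_stable _ _ _ _ i (by rw [pvChainsW_length]; omega) (by rw [pvResisW_length]; omega)]

lemma pvChainsW_getD_last (l : List (String × String × String)) (x : String × String × String) :
    (pvChainsW (l ++ [x])).getD l.length "" = x.1 := by
  rw [pvChainsW_append, ← pvChainsW_length l]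
  exact pvGetD_last _ _ _

lemma pvResisW_getD_last (l : List (String × String × String)) (x : String × String × String) :
    (pvResisW (l ++ [x])).getD l.length 0 = pvResi x := by
  rw [pvResisW_append, ← pvResisW_length l]
  exact pvGetD_last _ _ _

-- A's fold over a run-on list simulated by B's window emissions
lemma pvMainSim :
    ∀ (cont : List (String × String × String)) (x : String × String × String),
      (∀ y ∈ cont, y.1 ≠ "") → ∀ (s0 : String),
        (cont ++ [x]).foldl pvAStep (s0, none, -2, false) =
          (s0 ++ PySem.Str.join "" ((List.range (cont.length + 1)).map (pvEmit (cont ++ [x]))),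
           some x.1,
           (pvResisW (cont ++ [x])).getD cont.length 0,
           pvOpenedW (pvChainsW (cont ++ [x])) (pvResisW (cont ++ [x])) cont.length) := by
  intro cont
  induction cont using List.reverseRecOn with
  | nil =>
      intro x _ s0
      have hch : (pvChainsW [x]).getD 0 "" = x.1 := by simp [pvChainsW, List.getD]
      have hrs : (pvResisW [x]).getD 0 0 = pvResi x := by simp [pvResisW, pvResi, List.getD]
      have hpv : pvPrevValW (pvChainsW [x]) (pvResisW [x]) 0 = -2 := by
        simp [pvPrevValW]
      have hjoin : PySem.Str.join "" ((List.range (0 + 1)).map (pvEmit [x])) = pvEmit [x] 0 := by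
        rw [pvJoin_range_succ]
        simp [pvJoin_empty_nil]
      simp only [List.nil_append, List.length_nil, List.foldl_cons, List.foldl_nil] at *
      rw [hjoin]
      simp only [pvAStep, pvEmit, pvOpenerW, pvPieceW, pvOpenedW, hpv, hch, hrs, pvResi]
      by_cases hgt : (PySem.Int.ofStr? x.2.2).getD 0 > (-2 : Int) + 1
      · have hle : ¬ ((PySem.Int.ofStr? x.2.2).getD 0 ≤ (-2 : Int) + 1) := by omega
        simp only [if_pos hgt, if_neg hle]
        simp [String.append_assoc]
        omega
      · have hle : (PySem.Int.ofStr? x.2.2).getD 0 ≤ (-2 : Int) + 1 := by omega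
        simp only [if_neg hgt, if_pos hle]
        simp [String.append_assoc]
        omega
  | append_singleton l y ih =>
      intro x hne s0
      have hyne : y.1 ≠ "" := hne y (by simp)
      have hlne : ∀ z ∈ l, z.1 ≠ "" := fun z hz => hne z (by simp [hz])
      have hIH := ih y hlne s0
      set L := l ++ [y] with hL
      set L' := L ++ [x] with hL'
      set m := l.length with hm
      have hlenL : L.length = m + 1 := by rw [hL, hm]; simp
      -- getD facts over L'
      have hgc_n : (pvChainsW L').getD (m + 1) "" = x.1 := by
        rw [← hlenL]; exact pvChainsW_getD_last L x
      have hgr_n : (pvResisW L').getD (m + 1) 0 = pvResi x := by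
        rw [← hlenL]; exact pvResisW_getD_last L x
      have hgc_p : (pvChainsW L').getD m "" = y.1 := by
        rw [hL', pvChainsW_append,
          pvGetD_stable "" (pvChainsW L) x.1 m (by rw [pvChainsW_length, hlenL]; omega),
          hL]
        exact pvChainsW_getD_last l y
      have hgr_p : (pvResisW L').getD m 0 = pvResi y := by
        rw [hL', pvResisW_append,
          pvGetD_stable 0 (pvResisW L) (pvResi x) m (by rw [pvResisW_length, hlenL]; omega),
          hL]
        exact pvResisW_getD_last l y
      have hIHr : (pvResisW L).getD m 0 = pvResi y := by
        rw [hL]; exact pvResisW_getD_last l y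
      -- the previous `printed` flag is stable under the append
      have hopst : pvOpenedW (pvChainsW L') (pvResisW L') m =
          pvOpenedW (pvChainsW L) (pvResisW L) m := by
        rw [hL', pvChainsW_append, pvResisW_append]
        exact pvOpenedW_stable _ _ _ _ _
          (by rw [pvChainsW_length, hlenL]; omega) (by rw [pvResisW_length, hlenL]; omega)
      -- the join splits and its prefix is stable
      have hJ : PySem.Str.join "" ((List.range (m + 1 + 1)).map (pvEmit L')) =
          PySem.Str.join "" ((List.range (m + 1)).map (pvEmit L)) ++ pvEmit L' (m + 1) := by
        rw [pvJoin_range_succ]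
        congr 2
        apply List.map_congr_left
        intro i hi
        exact pvEmit_stable L x i
          (by rw [hlenL]; exact List.mem_range.mp hi)
      have hfold : L'.foldl pvAStep (s0, none, -2, false) =
          pvAStep (L.foldl pvAStep (s0, none, -2, false)) x := by
        rw [hL', List.foldl_append, List.foldl_cons, List.foldl_nil]
      -- goal indices: cont = L, cont.length = m + 1
      show L'.foldl pvAStep (s0, none, -2, false) =
        (s0 ++ PySem.Str.join "" ((List.range (L.length + 1)).map (pvEmit L')),
         some x.1, (pvResisW L').getD L.length 0,
         pvOpenedW (pvChainsW L') (pvResisW L') L.length)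
      rw [hfold, hIH, hlenL, hJ, hgr_n, hIHr, ← hopst]
      set pr := pvOpenedW (pvChainsW L') (pvResisW L') m with hpr
      have hn0 : ¬ (m + 1 = 0) := by omega
      have hnotfalsy :
          ¬ ((some y.1 : Option String) = none ∨ (some y.1 : Option String) = some "") := by
        simp [hyne]
      have hm1 : m + 1 - 1 = m := by omega
      by_cases hxy : y.1 = x.1
      · -- same chain: no opener, piece continues the run
        have hsame : ¬ ((some y.1 : Option String) ≠ some x.1) := by simp [hxy]
        have hpv : pvPrevValW (pvChainsW L') (pvResisW L') (m + 1) = pvResi y := by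
          unfold pvPrevValW
          rw [hm1, if_pos ⟨by omega, by rw [hgc_p, hgc_n]; exact hxy⟩]
          exact hgr_p
        have hopener : pvOpenerW (pvChainsW L') (pvResisW L') (m + 1) = "" := by
          unfold pvOpenerW
          rw [if_neg hn0, hm1, hgc_p, hgc_n, if_neg (by simp [hxy])]
        have hopn : pvOpenedW (pvChainsW L') (pvResisW L') (m + 1) =
            (if pvResi x > pvResi y + 1 then true else false) := by
          unfold pvOpenedW
          rw [hpv, hgr_n]
        simp only [pvAStep, if_neg hnotfalsy, if_neg hsame, pvEmit, hopener, pvPieceW,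
          hpv, hgr_n, hopn, hm1, ← hpr]
        by_cases hv : pvResi x > pvResi y + 1
        · have hv' : ¬ (pvResi x ≤ pvResi y + 1) := by omega
          simp only [pvResi] at hv hv' ⊢
          rw [if_pos hv, if_neg hv', if_pos hv]
          by_cases h2 : pvResi y = -2
          · simp only [pvResi] at h2
            rw [if_pos h2, if_pos h2]
            simp [hxy, String.append_assoc]
          · simp only [pvResi] at h2
            rw [if_neg h2, if_neg h2]
            cases hprv : pr <;> simp_all [String.append_assoc]
        · have hv' : pvResi x ≤ pvResi y + 1 := by omega
          simp only [pvResi] at hv hv' ⊢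
          rw [if_neg hv, if_pos hv', if_neg hv]
          simp [hxy]
      · -- chain switch: opener closes the previous run and opens a new group
        have hdiff : (some y.1 : Option String) ≠ some x.1 := by simp [hxy]
        have hpv : pvPrevValW (pvChainsW L') (pvResisW L') (m + 1) = -2 := by
          unfold pvPrevValW
          rw [hm1, if_neg (by rw [hgc_p, hgc_n]; exact fun h => hxy h.2)]
        have htail : pvTailW (pvChainsW L') (pvResisW L') (m + 1) =
            (if pr = true then "" else "-" ++ PySem.Int.toStr (pvResi y)) := by
          unfold pvTailW pvLastResiW
          rw [hm1, ← hpr]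
          by_cases hprv : pr = true
          · rw [if_pos ⟨by omega, hprv⟩, if_pos hprv]
          · rw [if_neg (fun h => hprv h.2), if_neg hprv,
              if_pos (show 0 < m + 1 by omega), hgr_p]
        have hopener : pvOpenerW (pvChainsW L') (pvResisW L') (m + 1) =
            (if pr = true then "" else "-" ++ PySem.Int.toStr (pvResi y)) ++
              ") + (chain " ++ x.1 ++ " & resi " := by
          unfold pvOpenerW
          rw [if_neg hn0, hm1, hgc_p, hgc_n, if_pos hxy, htail]
        have hopn : pvOpenedW (pvChainsW L') (pvResisW L') (m + 1) =
            (if pvResi x > (-2 : Int) + 1 then true else false) := by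
          unfold pvOpenedW
          rw [hpv, hgr_n]
        simp only [pvAStep, if_neg hnotfalsy, if_pos hdiff, pvEmit, hopener, pvPieceW,
          hpv, hgr_n, hopn, hm1, ← hpr]
        by_cases hv : pvResi x > (-2 : Int) + 1
        · have hv' : ¬ (pvResi x ≤ (-2 : Int) + 1) := by omega
          simp only [pvResi] at hv hv' ⊢
          rw [if_pos hv, if_neg hv', if_pos hv]
          cases hprv : pr <;> simp_all [String.append_assoc]
        · have hv' : pvResi x ≤ (-2 : Int) + 1 := by omega
          simp only [pvResi] at hv hv' ⊢
          rw [if_neg hv, if_pos hv', if_neg hv]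
          cases hprv : pr <;> simp_all [String.append_assoc]

-- ===== character-counting machinery for the tight claim =====
def pvCnt (c : Char) (s : String) : Nat := s.toList.count c

lemma pvCnt_append (c : Char) (a b : String) : pvCnt c (a ++ b) = pvCnt c a + pvCnt c b := by
  simp [pvCnt, String.toList_append]

lemma pvCnt_empty (c : Char) : pvCnt c "" = 0 := by simp [pvCnt]

lemma pvToDigitsCore_mem :
    ∀ (fuel n : Nat) (acc : List Char) (c : Char),
      c ∈ Nat.toDigitsCore 10 fuel n acc → c ∈ acc ∨ c.isDigit = true := by
  intro fuel
  induction fuel with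
  | zero =>
      intro n acc c h
      exact Or.inl (by simpa [Nat.toDigitsCore] using h)
  | succ f ih =>
      intro n acc c h
      have hdigit : (Nat.digitChar (n % 10)).isDigit = true := by
        have hlt : n % 10 < 10 := Nat.mod_lt _ (by norm_num)
        interval_cases h : n % 10 <;> decide
      rw [Nat.toDigitsCore] at h
      by_cases hz : n / 10 = 0
      · simp only [hz] at h
        rcases List.mem_cons.mp h with h | h
        · exact Or.inr (h ▸ hdigit)
        · exact Or.inl h
      · simp only [if_neg hz] at h
        rcases ih (n / 10) (Nat.digitChar (n % 10) :: acc) c h with h | h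
        · rcases List.mem_cons.mp h with h | h
          · exact Or.inr (h ▸ hdigit)
          · exact Or.inl h
        · exact Or.inr h

lemma pvCnt_toStr (c : Char) (hd : c.isDigit = false) (hm : c ≠ '-') :
    ∀ n : Int, pvCnt c (PySem.Int.toStr n) = 0 := by
  intro n
  have hdig : ∀ m : Nat, c ∉ Nat.toDigits 10 m := by
    intro m hmem
    rcases pvToDigitsCore_mem (m + 1) m [] c (by simpa [Nat.toDigits] using hmem) with h | h
    · simp at h
    · rw [h] at hd; cases hd
  unfold pvCnt
  rw [PySem.Int.toList_toStr]
  simp only [PySem.Int.toChars]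
  split_ifs with h
  · rw [List.count_eq_zero]
    intro hmem
    rcases List.mem_cons.mp hmem with h' | h'
    · exact hm h'
    · exact hdig _ h'
  · rw [List.count_eq_zero]
    exact fun hmem => hdig _ hmem

-- A's per-element count contribution (characters outside numbers/'-'/'+')
def pvACnt (c : Char) : Option String → List (String × String × String) → Nat
  | _, [] => 0
  | ch, x :: xs =>
      (if ch = none ∨ ch = some "" then
        pvCnt c "(chain " + pvCnt c x.1 + pvCnt c " & resi "
       else if ch ≠ some x.1 then
        pvCnt c ") + (chain " + pvCnt c x.1 + pvCnt c " & resi "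
       else 0) + pvACnt c (some x.1) xs

-- B's per-element count contribution (windowed openers)
def pvWCnt (c : Char) : Option String → List (String × String × String) → Nat
  | _, [] => 0
  | ch, x :: xs =>
      (if ch = none then
        pvCnt c "(chain " + pvCnt c x.1 + pvCnt c " & resi "
       else if ch ≠ some x.1 then
        pvCnt c ") + (chain " + pvCnt c x.1 + pvCnt c " & resi "
       else 0) + pvWCnt c (some x.1) xs

lemma pvACnt_fold (c : Char) (hdig : ∀ n : Int, pvCnt c (PySem.Int.toStr n) = 0)
    (hm : pvCnt c "-" = 0) (hp : pvCnt c "+" = 0) :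
    ∀ (l : List (String × String × String)) (s : String) (ch : Option String)
      (prev : Int) (printed : Bool),
      pvCnt c ((l.foldl pvAStep (s, ch, prev, printed)).1) = pvCnt c s + pvACnt c ch l := by
  intro l
  induction l with
  | nil => intro s ch prev printed; simp [pvACnt]
  | cons x xs ih =>
      intro s ch prev printed
      simp only [List.foldl_cons, pvAStep]
      split_ifs <;> (rw [ih]; simp only [pvACnt]; simp_all [pvCnt_append]) <;> omega

lemma pvCnt_if (c : Char) (P : Prop) [Decidable P] (a b : String) :
    pvCnt c (if P then a else b) = if P then pvCnt c a else pvCnt c b := by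
  split_ifs <;> rfl

lemma pvA_out_cnt (c : Char) (hdig : ∀ n : Int, pvCnt c (PySem.Int.toStr n) = 0)
    (hm : pvCnt c "-" = 0) (hp : pvCnt c "+" = 0) (prot : String)
    (cont : List (String × String × String)) :
    pvCnt c (SimplifySelection prot cont) =
      pvCnt c prot + pvCnt c " & n. ca & " +
        (if 1 < PySem.Set.len (PySem.Set.ofList (cont.map (fun x => x.1))) then
          pvCnt c "(" + pvCnt c ")" else 0) +
        pvACnt c none cont + pvCnt c ")" := by
  simp only [SimplifySelection]
  rw [pvCnt_append, pvCnt_append, pvCnt_append,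
    pvACnt_fold c hdig hm hp cont _ none (-2) false,
    pvCnt_append, pvCnt_append, pvCnt_if, pvCnt_if, pvCnt_if]
  first
  | (simp [pvCnt_append, pvCnt_empty, hdig, hm]; split_ifs <;> omega)
  | simp [pvCnt_append, pvCnt_empty, hdig, hm]

lemma pvCnt_tailW (c : Char) (hdig : ∀ n : Int, pvCnt c (PySem.Int.toStr n) = 0)
    (hm : pvCnt c "-" = 0) (ch : List String) (rs : List Int) (i : Nat) :
    pvCnt c (pvTailW ch rs i) = 0 := by
  unfold pvTailW
  split_ifs
  · exact pvCnt_empty c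
  · rw [pvCnt_append, hm, hdig]

lemma pvCnt_pieceW (c : Char) (hdig : ∀ n : Int, pvCnt c (PySem.Int.toStr n) = 0)
    (hm : pvCnt c "-" = 0) (hp : pvCnt c "+" = 0) (ch : List String) (rs : List Int) (i : Nat) :
    pvCnt c (pvPieceW ch rs i) = 0 := by
  unfold pvPieceW
  simp only [pvCnt_if]
  split_ifs <;> simp [pvCnt_append, pvCnt_empty, hdig, hm, hp]

lemma pvCnt_emit (c : Char) (hdig : ∀ n : Int, pvCnt c (PySem.Int.toStr n) = 0)
    (hm : pvCnt c "-" = 0) (hp : pvCnt c "+" = 0)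
    (l : List (String × String × String)) (i : Nat) :
    pvCnt c (pvEmit l i) =
      (if i = 0 then pvCnt c "(chain " + pvCnt c ((pvChainsW l).getD i "") + pvCnt c " & resi "
       else if (pvChainsW l).getD (i - 1) "" ≠ (pvChainsW l).getD i "" then
        pvCnt c ") + (chain " + pvCnt c ((pvChainsW l).getD i "") + pvCnt c " & resi "
       else 0) := by
  unfold pvEmit pvOpenerW
  rw [pvCnt_append, pvCnt_pieceW c hdig hm hp]
  split_ifs
  · simp [pvCnt_append]
  · rw [pvCnt_append, pvCnt_append, pvCnt_append, pvCnt_tailW c hdig hm]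
    omega
  · simp [pvCnt_empty]

def pvLastCh (ch : Option String) (l : List (String × String × String)) : Option String :=
  l.foldl (fun _ x => some x.1) ch

lemma pvLastCh_append (ch : Option String) (l : List (String × String × String))
    (x : String × String × String) : pvLastCh ch (l ++ [x]) = some x.1 := by
  unfold pvLastCh
  rw [List.foldl_append]
  rfl

lemma pvWCnt_append (c : Char) :
    ∀ (l : List (String × String × String)) (ch : Option String) (x : String × String × String),
      pvWCnt c ch (l ++ [x]) = pvWCnt c ch l +
        (if pvLastCh ch l = none then pvCnt c "(chain " + pvCnt c x.1 + pvCnt c " & resi "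
         else if pvLastCh ch l ≠ some x.1 then
          pvCnt c ") + (chain " + pvCnt c x.1 + pvCnt c " & resi "
         else 0) := by
  intro l
  induction l with
  | nil =>
      intro ch x
      simp only [List.nil_append, pvWCnt, pvLastCh, List.foldl_nil]
      split_ifs <;> omega
  | cons y t ih =>
      intro ch x
      simp only [List.cons_append, pvWCnt]
      rw [ih (some y.1) x]
      have : pvLastCh ch (y :: t) = pvLastCh (some y.1) t := rfl
      rw [this]
      omega

lemma pvB_body_cnt (c : Char) (hdig : ∀ n : Int, pvCnt c (PySem.Int.toStr n) = 0)
    (hm : pvCnt c "-" = 0) (hp : pvCnt c "+" = 0) :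
    ∀ (l : List (String × String × String)),
      pvCnt c (PySem.Str.join "" ((List.range l.length).map (pvEmit l))) =
        pvWCnt c none l := by
  intro l
  induction l using List.reverseRecOn with
  | nil => simp [pvJoin_empty_nil, pvCnt_empty, pvWCnt]
  | append_singleton l x ih =>
      have hlen : (l ++ [x]).length = l.length + 1 := by simp
      rw [hlen, pvJoin_range_succ, pvCnt_append]
      have hpre : PySem.Str.join "" ((List.range l.length).map (pvEmit (l ++ [x]))) =
          PySem.Str.join "" ((List.range l.length).map (pvEmit l)) := by
        congr 1
        apply List.map_congr_left
        intro i hi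
        exact pvEmit_stable l x i (by simpa using List.mem_range.mp hi)
      rw [hpre, ih, pvWCnt_append c l none x,
        pvCnt_emit c hdig hm hp (l ++ [x]) l.length]
      congr 1
      rcases List.eq_nil_or_concat l with rfl | ⟨a, y, rfl⟩
      · simp [pvLastCh, pvChainsW, List.getD]
      · simp only [List.concat_eq_append]
        have hlast : pvLastCh none (a ++ [y]) = some y.1 := pvLastCh_append none a y
        have hna : ¬ ((a ++ [y]).length = 0) := by simp
        have hgc : (pvChainsW ((a ++ [y]) ++ [x])).getD (a ++ [y]).length "" = x.1 :=
          pvChainsW_getD_last (a ++ [y]) x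
        have hgp : (pvChainsW ((a ++ [y]) ++ [x])).getD ((a ++ [y]).length - 1) "" = y.1 := by
          rw [pvChainsW_append,
            pvGetD_stable "" (pvChainsW (a ++ [y])) x.1 _
              (by rw [pvChainsW_length]; simp)]
          have : (a ++ [y]).length - 1 = a.length := by simp
          rw [this]
          exact pvChainsW_getD_last a y
        rw [if_neg hna, hgc, hgp, hlast,
          if_neg (show ¬ ((some y.1 : Option String) = none) by simp)]
        by_cases hxy : y.1 = x.1
        · rw [if_neg (show ¬ (y.1 ≠ x.1) by simp [hxy]),
            if_neg (show ¬ ((some y.1 : Option String) ≠ some x.1) by simp [hxy])]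
        · rw [if_pos hxy,
            if_pos (show (some y.1 : Option String) ≠ some x.1 by simp [hxy])]

lemma pvB_out_cnt (c : Char) (hdig : ∀ n : Int, pvCnt c (PySem.Int.toStr n) = 0)
    (hm : pvCnt c "-" = 0) (hp : pvCnt c "+" = 0) (prot : String)
    (cont : List (String × String × String)) :
    pvCnt c (SimplifySelection_alt prot cont) =
      pvCnt c prot + pvCnt c " & n. ca & " +
        (if 1 < PySem.Set.len (PySem.Set.ofList (cont.map (fun x => x.1))) then
          pvCnt c "(" + pvCnt c ")" else 0) +
        pvWCnt c none cont + pvCnt c ")" := by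
  simp only [SimplifySelection_alt]
  rw [pvCnt_append, pvCnt_append, pvCnt_append]
  have hbody : pvCnt c (PySem.Str.join ""
      ((List.range cont.length).map
        (fun i => pvOpenerW (pvChainsW cont) (pvResisW cont) i ++
          pvPieceW (pvChainsW cont) (pvResisW cont) i)) ++
      pvTailW (pvChainsW cont) (pvResisW cont) cont.length) = pvWCnt c none cont := by
    rw [pvCnt_append, pvCnt_tailW c hdig hm]
    have := pvB_body_cnt c hdig hm hp cont
    simpa [pvEmit] using this
  simp only [pvChainsW] at hbody ⊢
  split_ifs with hmu
  · rw [pvCnt_append, pvCnt_append, hbody]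
    omega
  · rw [hbody]
    omega

-- the two spare counts: '&' counts A's extra reopen after a '' chain,
-- ')' counts B's extra close at a '' → X boundary
lemma pvKey :
    ∀ (l : List (String × String × String)) (ch : Option String),
      (pvWCnt '&' ch l + pvACnt ')' ch l ≤ pvACnt '&' ch l + pvWCnt ')' ch l) ∧
      ((l.dropLast.any (fun x => x.1 == "") = true ∨ (ch = some "" ∧ l ≠ [])) →
        pvWCnt '&' ch l + pvACnt ')' ch l + 1 ≤ pvACnt '&' ch l + pvWCnt ')' ch l) := by
  intro l
  induction l with
  | nil =>
      intro ch
      refine ⟨by simp [pvACnt, pvWCnt], ?_⟩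
      rintro (h | ⟨_, h⟩) <;> simp_all
  | cons x xs ih =>
      intro ch
      have hmid : (x :: xs).dropLast.any (fun z => z.1 == "") = true ↔
          xs ≠ [] ∧ (x.1 = "" ∨ xs.dropLast.any (fun z => z.1 == "") = true) := by
        match xs with
        | [] => simp
        | y :: t =>
            simp [List.dropLast_cons₂]
            try tauto
      have lit1 : pvCnt '&' "(chain " = 0 := by decide
      have lit2 : pvCnt '&' " & resi " = 1 := by decide
      have lit3 : pvCnt '&' ") + (chain " = 0 := by decide
      have lit6 : pvCnt ')' "(chain " = 0 := by decide
      have lit7 : pvCnt ')' " & resi " = 0 := by decide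
      have lit8 : pvCnt ')' ") + (chain " = 1 := by decide
      have ihx1 := (ih (some x.1)).1
      have tail_of : (xs ≠ [] ∧ (x.1 = "" ∨ xs.dropLast.any (fun z => z.1 == "") = true)) →
          pvWCnt '&' (some x.1) xs + pvACnt ')' (some x.1) xs + 1 ≤
            pvACnt '&' (some x.1) xs + pvWCnt ')' (some x.1) xs := by
        rintro ⟨hne', hcase⟩
        exact (ih (some x.1)).2 (by
          rcases hcase with hcase | hcase
          · exact Or.inr ⟨by rw [hcase], hne'⟩
          · exact Or.inl hcase)
      rcases Option.eq_none_or_eq_some ch with hch | ⟨t, hch⟩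
      · subst hch
        constructor
        · simp only [pvACnt, pvWCnt]
          simp [lit1, lit2, lit3, lit6, lit7, lit8]
          omega
        · intro h
          have tail := tail_of (hmid.mp (h.resolve_right (by simp)))
          simp only [pvACnt, pvWCnt]
          simp [lit1, lit2, lit3, lit6, lit7, lit8]
          omega
      · subst hch
        by_cases ht : t = ""
        · subst ht
          by_cases hx1 : x.1 = ""
          · -- '' followed by '': A reopens (one extra ' & resi '), B merges
            have h0 : pvCnt '&' x.1 = 0 := by rw [hx1]; decide
            have h0' : pvCnt ')' x.1 = 0 := by rw [hx1]; decide
            have ihx2A := (ih (some "")).1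
            constructor
            · simp only [pvACnt, pvWCnt]
              simp [lit1, lit2, lit3, lit6, lit7, lit8, hx1, pvCnt_empty]
              omega
            · intro _
              simp only [pvACnt, pvWCnt]
              simp [lit1, lit2, lit3, lit6, lit7, lit8, hx1, pvCnt_empty]
              omega
          · -- '' followed by a different chain: B closes the '' group (extra ')')
            have hx1' : ¬ (("" : String) = x.1) := fun h => hx1 h.symm
            constructor
            · simp only [pvACnt, pvWCnt]
              simp [lit1, lit2, lit3, lit6, lit7, lit8, hx1']
              omega
            · intro _
              simp only [pvACnt, pvWCnt]
              simp [lit1, lit2, lit3, lit6, lit7, lit8, hx1']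
              omega
        · have hK1tail : ((x :: xs).dropLast.any (fun z => z.1 == "") = true ∨
              ((some t : Option String) = some "" ∧ (x :: xs : List (String × String × String)) ≠ [])) →
              xs ≠ [] ∧ (x.1 = "" ∨ xs.dropLast.any (fun z => z.1 == "") = true) := by
            intro h
            exact hmid.mp (h.resolve_right (fun hh => ht (by simpa using hh.1)))
          by_cases hxt : t = x.1
          · subst hxt
            constructor
            · simp only [pvACnt, pvWCnt]
              simp [ht]
              omega
            · intro h
              have tail := tail_of (hK1tail h)
              simp only [pvACnt, pvWCnt]
              simp [ht]
              omega
          · have hxt' : ¬ (t = x.1) := hxt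
            constructor
            · simp only [pvACnt, pvWCnt]
              simp [lit1, lit2, lit3, lit6, lit7, lit8, ht, hxt']
              omega
            · intro h
              have tail := tail_of (hK1tail h)
              simp only [pvACnt, pvWCnt]
              simp [lit1, lit2, lit3, lit6, lit7, lit8, ht, hxt']
              omega

-- ===== VERDICT (by name: the statement is the Claim_ definition above) =====
theorem SimplifySelection_spec : Claim_unchanged_SimplifySelection := by
  unfold Claim_unchanged_SimplifySelection
  intro prot cont hdom hpre
  unfold Spec_SimplifySelection
  intro hnd
  unfold D_SimplifySelection at hnd
  have h2 : PySem.Int.toStr (-2) = "-2" := by decide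
  rcases List.eq_nil_or_concat cont with rfl | ⟨l, x, rfl⟩
  · -- empty cont: both produce the '--2' trailer
    have hm : ¬ (1 < PySem.Set.len (PySem.Set.ofList
        (([] : List (String × String × String)).map (fun x => x.1)))) := by decide
    simp only [SimplifySelection, SimplifySelection_alt, List.foldl_nil, List.length_nil,
      List.range_zero, List.map_nil, if_neg hm]
    rw [pvJoin_empty_nil]
    have htail : pvTailW (pvChainsW []) (pvResisW []) 0 = "--2" := by
      unfold pvTailW pvLastResiW
      rw [if_neg (by simp), if_neg (by simp), h2]
      rfl
    rw [htail, ← String.toList_inj]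
    simp [String.toList_append]
    decide
  · simp only [List.concat_eq_append] at hnd ⊢
    have hlne : ∀ z ∈ l, z.1 ≠ "" := by
      intro z hz hzz
      apply hnd
      rw [List.dropLast_concat, List.any_eq_true]
      exact ⟨z, hz, by simp [hzz]⟩
    set multi := 1 < PySem.Set.len (PySem.Set.ofList ((l ++ [x]).map (fun y => y.1))) with hmulti
    have hsim := pvMainSim l x hlne
      (prot ++ " & n. ca & " ++ (if multi then "(" else ""))
    have hmeq : (1 < PySem.Set.len (PySem.Set.ofList (pvChainsW (l ++ [x])))) = multi := rfl
    have hlen : (l ++ [x]).length = l.length + 1 := by simp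
    have htail : (if pvOpenedW (pvChainsW (l ++ [x])) (pvResisW (l ++ [x])) l.length = false then
        "-" ++ PySem.Int.toStr ((pvResisW (l ++ [x])).getD l.length 0) else "") =
        pvTailW (pvChainsW (l ++ [x])) (pvResisW (l ++ [x])) (l.length + 1) := by
      unfold pvTailW pvLastResiW
      have : l.length + 1 - 1 = l.length := by omega
      rw [this]
      cases hb : pvOpenedW (pvChainsW (l ++ [x])) (pvResisW (l ++ [x])) l.length <;>
        simp [hb]
    simp only [SimplifySelection, SimplifySelection_alt, ← hmulti, hmeq, hlen]
    rw [hsim, htail]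
    set J := PySem.Str.join ""
      ((List.range (l.length + 1)).map (pvEmit (l ++ [x]))) with hJ
    have hJ' : PySem.Str.join ""
        ((List.range (l.length + 1)).map
          (fun i => pvOpenerW (pvChainsW (l ++ [x])) (pvResisW (l ++ [x])) i ++
            pvPieceW (pvChainsW (l ++ [x])) (pvResisW (l ++ [x])) i)) = J := rfl
    rw [hJ']
    by_cases hmu : multi
    · simp only [if_pos hmu]
      rw [← String.toList_inj]
      simp [String.toList_append, List.append_assoc]
    · simp only [if_neg hmu]
      rw [← String.toList_inj]
      simp [String.toList_append, List.append_assoc]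

theorem SimplifySelection_changed : Claim_changed_SimplifySelection := by
  unfold Claim_changed_SimplifySelection; decide

theorem SimplifySelection_tight : Claim_exact_SimplifySelection := by
  unfold Claim_exact_SimplifySelection
  intro prot cont hdom hpre hd hEq
  unfold D_SimplifySelection at hd
  have hdigA : ∀ n : Int, pvCnt '&' (PySem.Int.toStr n) = 0 :=
    pvCnt_toStr '&' (by decide) (by decide)
  have hdigP : ∀ n : Int, pvCnt ')' (PySem.Int.toStr n) = 0 :=
    pvCnt_toStr ')' (by decide) (by decide)
  have eAamp := pvA_out_cnt '&' hdigA (by decide) (by decide) prot cont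
  have eBamp := pvB_out_cnt '&' hdigA (by decide) (by decide) prot cont
  have eApar := pvA_out_cnt ')' hdigP (by decide) (by decide) prot cont
  have eBpar := pvB_out_cnt ')' hdigP (by decide) (by decide) prot cont
  have hcA : pvCnt '&' (SimplifySelection prot cont) =
      pvCnt '&' (SimplifySelection_alt prot cont) := by rw [hEq]
  have hcP : pvCnt ')' (SimplifySelection prot cont) =
      pvCnt ')' (SimplifySelection_alt prot cont) := by rw [hEq]
  rw [eAamp, eBamp] at hcA
  rw [eApar, eBpar] at hcP
  have hkey := (pvKey cont none).2 (Or.inl hd)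
  by_cases hmu : 1 < PySem.Set.len (PySem.Set.ofList (cont.map (fun x => x.1)))
  · rw [if_pos hmu] at hcA hcP
    omega
  · rw [if_neg hmu] at hcA hcP
    omega
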